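-- pv_equiv track=rewrite | github.com/dayeondev/AlgoStudy | 21.12/Week5/셀프_넘버.py | d_func
-- ===== SOURCE A (Python) =====
-- def d_func(num, found_nums):
--
--     if num < 10001:
--         res_num = 0
--         parts = list(str(num))
--         parts = list(map(int, parts))
--
--         res_num = num + sum(parts)
--         found_nums.append(res_num)
--         return d_func(res_num, found_nums)
--     else:
--         return found_nums
-- ===== SOURCE B (Python) =====
-- def d_func(num, found_nums):
--     chain = []
--     while num < 10001:
--         s, n = 0, num
--         while n > 0:
--             s += n % 10
--             n //= 10
--         num += s
--         chain.append(num)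
--     found_nums.extend(chain)
--     return found_nums
-- ===== Notes on version B (the rewrite author's own statement) =====
-- stated objective: alternative
-- what changed: Replaces the self-recursion that converts num to a string to sum its digits by an iterative while loop that extracts digits arithmetically (mod/floor-div by 10) and appends the whole chain to found_nums once at the end.
import Mathlib
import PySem

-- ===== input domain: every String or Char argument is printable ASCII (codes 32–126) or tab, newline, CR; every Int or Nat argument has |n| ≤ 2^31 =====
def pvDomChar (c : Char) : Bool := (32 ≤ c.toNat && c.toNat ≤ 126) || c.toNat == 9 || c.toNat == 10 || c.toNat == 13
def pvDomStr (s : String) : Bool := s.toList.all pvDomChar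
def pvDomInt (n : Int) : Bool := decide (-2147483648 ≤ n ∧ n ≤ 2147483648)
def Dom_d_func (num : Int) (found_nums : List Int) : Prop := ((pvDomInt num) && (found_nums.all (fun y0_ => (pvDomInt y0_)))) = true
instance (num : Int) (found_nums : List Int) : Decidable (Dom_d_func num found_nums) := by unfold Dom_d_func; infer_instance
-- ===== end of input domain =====

-- B replaces A's string-based digit sum and self-recursion by an iterative loop that
-- extracts digits arithmetically (mod/div 10) and appends the whole chain once.
-- Equivalence is about the RETURN value; Python A and B both mutate found_nums to the same list.

-- ===== PORT A =====
-- digit sum exactly as Python A computes it: int(c) for each character of str(num)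
def pyDigitSum (n : Int) : Int :=
  (((PySem.Int.toStr n).toList).map (fun c => (PySem.Int.ofStr? (String.ofList [c])).getD 0)).sum

-- A is a self-recursion; driven by fuel (10002 steps cover every input in Pre_,
-- since num grows by ≥ 1 per step while num < 10001).
def d_func_go (fuel : Nat) (num : Int) (found_nums : List Int) : List Int :=
  match fuel with
  | 0 => found_nums
  | f + 1 =>
    if num < 10001 then
      let res_num := num + pyDigitSum num
      d_func_go f res_num (found_nums ++ [res_num])
    else found_nums

def d_func (num : Int) (found_nums : List Int) : List Int :=
  d_func_go 10002 num found_nums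

-- ===== PORT B =====
-- Source B's inner `while n > 0: s += n % 10; n //= 10`, on the Nat n.toNat (exact for
-- the positive n Python reaches: Nat % and / then agree with Python's % and //).
-- The fuel argument (starting at n itself, which bounds the iteration count) only
-- totalizes the while loop, as fuel does for A.
def digitSumGo : Nat → Nat → Int
  | 0, _ => 0
  | f + 1, n => if 0 < n then (↑(n % 10) : Int) + digitSumGo f (n / 10) else 0

def digitSumB (n : Int) : Int := digitSumGo n.toNat n.toNat

-- Source B's outer while loop, building the local list `chain`
def chain_go : Nat → Int → List Int
  | 0, _ => []
  | f + 1, num =>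
    if num < 10001 then
      let next := num + digitSumB num
      next :: chain_go f next
    else []

-- found_nums.extend(chain); return found_nums
def d_func_alt (num : Int) (found_nums : List Int) : List Int :=
  found_nums ++ chain_go 10002 num

-- ===== PRECONDITION & SPEC =====
-- Pre_ excludes num ≤ 0: there Python A never returns (ValueError from int('-') on a
-- negative num; unbounded recursion on num = 0, whose digit sum is 0).
def Pre_d_func (num : Int) (found_nums : List Int) : Prop := 1 ≤ num
instance (num : Int) (found_nums : List Int) : Decidable (Pre_d_func num found_nums) := by unfold Pre_d_func; infer_instance
def pvWitness_d_func : Int × List Int := (9990, [3])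

def Spec_d_func (num : Int) (found_nums : List Int) (out : List Int) : Prop := out = d_func_alt num found_nums
instance (num : Int) (found_nums : List Int) (out : List Int) : Decidable (Spec_d_func num found_nums out) := by unfold Spec_d_func; infer_instance

-- ===== CLAIM =====
def Claim_equal_d_func : Prop := ∀ (num : Int) (found_nums : List Int), Dom_d_func num found_nums → Pre_d_func num found_nums → Spec_d_func num found_nums (d_func num found_nums)

-- ===== LEMMAS AND PROOFS =====
-- the value Python assigns to a single digit character
def charVal (c : Char) : Int := (PySem.Int.ofStr? (String.ofList [c])).getD 0

lemma charVal_digitChar : ∀ d : Nat, d < 10 → charVal (Nat.digitChar d) = (d : Int) := by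
  decide

-- digitSumGo ignores its fuel once the fuel covers the argument
lemma digitSumGo_congr : ∀ (f g n : Nat), n ≤ f → n ≤ g →
    digitSumGo f n = digitSumGo g n := by
  intro f
  induction f with
  | zero =>
    intro g n hf _
    interval_cases n
    cases g <;> simp [digitSumGo]
  | succ f ih =>
    intro g n hf hg
    match g, hg with
    | 0, hg =>
      interval_cases n
      simp [digitSumGo]
    | g + 1, hg =>
      simp only [digitSumGo]
      by_cases h0 : 0 < n
      · rw [if_pos h0, if_pos h0, ih g (n / 10) (by omega) (by omega)]
      · rw [if_neg h0, if_neg h0]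

-- one unfolding step of B's digit sum, in Nat terms
lemma digitSumGo_step (k : Nat) (hk : k ≠ 0) :
    digitSumGo k k = (↑(k % 10) : Int) + digitSumGo (k / 10) (k / 10) := by
  match k, hk with
  | f + 1, _ =>
    simp only [digitSumGo]
    rw [if_pos (by omega)]
    rw [digitSumGo_congr f ((f + 1) / 10) ((f + 1) / 10) (by omega) (by omega)]

lemma digitSumGo_nonneg : ∀ (f n : Nat), 0 ≤ digitSumGo f n := by
  intro f
  induction f with
  | zero => intro n; simp [digitSumGo]
  | succ f ih =>
    intro n
    simp only [digitSumGo]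
    split
    · have := ih (n / 10); omega
    · exact le_refl 0

-- summing the characters that Nat.toDigitsCore pushes equals the arithmetic digit sum
lemma toDigitsCore_sum (f : Nat) : ∀ (n : Nat) (acc : List Char), n < f →
    ((Nat.toDigitsCore 10 f n acc).map charVal).sum
      = (↑(n % 10) : Int) + digitSumGo (n / 10) (n / 10) + ((acc.map charVal).sum) := by
  induction f with
  | zero => intro n acc h; omega
  | succ f ih =>
    intro n acc h
    rw [Nat.toDigitsCore]
    by_cases h0 : n / 10 = 0
    · rw [if_pos h0]
      simp only [List.map_cons, List.sum_cons, charVal_digitChar (n % 10) (by omega), h0]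
      simp [digitSumGo]
    · rw [if_neg h0, ih (n / 10) _ (by omega)]
      simp only [List.map_cons, List.sum_cons, charVal_digitChar (n % 10) (by omega)]
      rw [digitSumGo_step (n / 10) h0]
      ring

-- bridge: the string digit sum of A equals the arithmetic digit sum of B, for n ≥ 0
lemma pyDigitSum_eq (n : Int) (hn : 0 ≤ n) : pyDigitSum n = digitSumB n := by
  unfold pyDigitSum digitSumB
  rw [PySem.Int.toList_toStr]
  unfold PySem.Int.toChars
  rw [if_neg (by omega)]
  unfold Nat.toDigits
  have hsum := toDigitsCore_sum (n.toNat + 1) n.toNat [] (by omega)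
  simp only [List.map_nil, List.sum_nil, add_zero] at hsum
  show ((Nat.toDigitsCore 10 (n.toNat + 1) n.toNat []).map charVal).sum = _
  rw [hsum]
  by_cases h0 : n.toNat = 0
  · simp [h0, digitSumGo]
  · rw [digitSumGo_step n.toNat h0]

lemma go_eq_chain (fuel : Nat) : ∀ (num : Int) (found : List Int),
    1 ≤ num → d_func_go fuel num found = found ++ chain_go fuel num := by
  induction fuel with
  | zero => intro num found _; simp [d_func_go, chain_go]
  | succ f ih =>
    intro num found h
    rw [d_func_go, chain_go]
    by_cases hlt : num < 10001
    · rw [if_pos hlt, if_pos hlt]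
      have hds : pyDigitSum num = digitSumB num := pyDigitSum_eq num (by omega)
      have hge : 0 ≤ digitSumB num := digitSumGo_nonneg _ _
      simp only [hds]
      rw [ih (num + digitSumB num) _ (by omega)]
      simp
    · rw [if_neg hlt, if_neg hlt]
      simp

-- ===== VERDICT =====
theorem d_func_spec : Claim_equal_d_func := by
  intro num found _ hpre
  unfold Spec_d_func d_func d_func_alt
  exact go_eq_chain 10002 num found hpre
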